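-- pv_equiv track=rewrite | github.com/Avaren/adventofcode2018 | 2.py | has_multiple
-- ===== SOURCE A (Python) =====
-- import collections
--
-- def has_multiple(package):
--     has_two = has_three = False
--     count = collections.Counter(package)
--     for v in count.values():
--         if v == 2:
--             has_two = True
--         elif v == 3:
--             has_three = True
--     return has_two, has_three
-- ===== SOURCE B (Python) =====
-- def has_multiple(package):
--     # Sort the characters and scan consecutive equal runs instead of hashing counts.
--     s = sorted(package)
--     has_two = has_three = False
--     i, n = 0, len(s)
--     while i < n:
--         j = i + 1
--         while j < n and s[j] == s[i]:
--             j += 1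
--         run = j - i
--         if run == 2:
--             has_two = True
--         if run == 3:
--             has_three = True
--         i = j
--     return has_two, has_three
-- ===== Notes on version B (the rewrite author's own statement) =====
-- stated objective: alternative
-- what changed: Replaces the Counter hash-count pass by sorting the characters and scanning consecutive equal runs, setting the flags from run lengths.
import Mathlib
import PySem

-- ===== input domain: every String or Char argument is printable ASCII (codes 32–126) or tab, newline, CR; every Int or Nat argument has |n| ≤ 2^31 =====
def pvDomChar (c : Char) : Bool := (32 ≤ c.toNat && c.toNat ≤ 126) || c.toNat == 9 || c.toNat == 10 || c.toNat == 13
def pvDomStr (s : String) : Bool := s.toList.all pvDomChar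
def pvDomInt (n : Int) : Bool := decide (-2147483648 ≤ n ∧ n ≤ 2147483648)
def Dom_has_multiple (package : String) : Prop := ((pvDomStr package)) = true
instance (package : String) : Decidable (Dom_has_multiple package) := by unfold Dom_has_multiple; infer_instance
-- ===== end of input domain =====

-- B sorts the characters and scans consecutive equal runs instead of A's Counter pass; same result, alternative algorithm.

-- ===== PORT A =====
def has_multiple (package : String) : Bool × Bool :=
  let count := PySem.Dict.counter package.toList
  count.values.foldl
    (fun st v =>
      if v == (2 : Int) then (true, st.2)
      else if v == (3 : Int) then (st.1, true)
      else st)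
    (false, false)

-- ===== PORT B =====
-- the outer while loop of Source B: consume one run of equal characters per step
def runsScan : List Char → Bool → Bool → Bool × Bool
  | [], t2, t3 => (t2, t3)
  | c :: rest, t2, t3 =>
    let run := 1 + (rest.takeWhile (fun x => x == c)).length
    runsScan (rest.dropWhile (fun x => x == c)) (t2 || run == 2) (t3 || run == 3)
termination_by l => l.length
decreasing_by
  simpa using Nat.lt_succ_of_le (List.length_dropWhile_le _ _)

def has_multiple_alt (package : String) : Bool × Bool :=
  runsScan (PySem.List.sorted package.toList (fun c => c) false) false false

-- ===== PRECONDITION & SPEC =====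
def Spec_has_multiple (package : String) (out : Bool × Bool) : Prop := out = has_multiple_alt package
instance (package : String) (out : Bool × Bool) : Decidable (Spec_has_multiple package out) := by unfold Spec_has_multiple; infer_instance

-- ===== CLAIM (what is proved, stated in full; the proofs are below) =====
def Claim_equal_has_multiple : Prop := ∀ (package : String), Dom_has_multiple package → Spec_has_multiple package (has_multiple package)

-- ===== LEMMAS AND PROOFS =====

-- shared characterisation: (∃ char with count 2, ∃ char with count 3)
def spec2_3 (l : List Char) : Bool × Bool :=
  (l.any (fun c => l.count c == 2), l.any (fun c => l.count c == 3))

theorem foldl_or {α : Type} (l : List α) (p : α → Bool) (b : Bool) :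
    l.foldl (fun acc x => acc || p x) b = (b || l.any p) := by
  induction l generalizing b with
  | nil => simp
  | cons x t ih => simp [List.foldl_cons, ih, Bool.or_assoc]

theorem any_eq_of_mem_iff {α : Type} {l₁ l₂ : List α} (p : α → Bool)
    (h : ∀ x, x ∈ l₁ ↔ x ∈ l₂) : l₁.any p = l₂.any p := by
  apply Bool.eq_iff_iff.mpr
  simp only [List.any_eq_true]
  constructor <;> rintro ⟨x, hx, hp⟩
  · exact ⟨x, (h x).mp hx, hp⟩
  · exact ⟨x, (h x).mpr hx, hp⟩

theorem A_eq_spec (package : String) : has_multiple package = spec2_3 package.toList := by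
  unfold has_multiple
  set l := package.toList with hl
  have hval : (PySem.Dict.counter l).values = (PySem.Set.ofList l).map (fun k => (l.count k : Int)) := by
    rw [show (PySem.Dict.counter l).values = (PySem.Dict.counter l).items.map (·.2) from rfl,
        PySem.Dict.items_counter]
    simp
  simp only [hval]
  rw [PySem.List.foldl_congr_mem _ _
      (fun (st : Bool × Bool) v => (st.1 || (v == (2:Int)), st.2 || (v == (3:Int)))) _
      (by
        rintro ⟨a, b⟩ v _
        by_cases h2 : v = 2
        · simp [h2]
        · by_cases h3 : v = 3 <;> simp [h2, h3])]
  rw [PySem.List.foldl_prod_mk (f := fun acc v => acc || (v == (2:Int)))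
      (g := fun acc v => acc || (v == (3:Int)))]
  rw [foldl_or, foldl_or]
  have hcast : ∀ (k : Nat) (m : Nat), ((k:Int) == (m:Int)) = (k == m) := by
    intro k m; apply Bool.eq_iff_iff.mpr; simp
  unfold spec2_3
  simp only [List.any_map, Prod.mk.injEq]
  constructor <;>
  · simp only [Bool.false_or]
    rw [show ∀ f g : Char → Bool, f = g → ∀ (m : List Char), m.any f = m.any g from fun f g h m => by rw [h]]
    · exact any_eq_of_mem_iff _ (fun x => PySem.Set.mem_ofList l x)
    · funext k; exact hcast _ _

theorem any_all_eq {α : Type} (t : List α) (p : α → Bool) (b : Bool) (h : ∀ x ∈ t, p x = b) :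
    t.any p = (!t.isEmpty && b) := by
  induction t with
  | nil => simp
  | cons a t' ih =>
    simp only [List.any_cons, h a (by simp), List.isEmpty_cons]
    cases b
    · simp [ih (fun x hx => h x (by simp [hx]))]
    · simp

theorem any_count_run (c : Char) (t d : List Char)
    (ht : ∀ x ∈ t, x = c) (hd : ∀ x ∈ d, x ≠ c) (k : Nat) :
    (c :: (t ++ d)).any (fun x => (c :: (t ++ d)).count x == k)
      = (((1 + t.length : Nat) == k) || d.any (fun x => d.count x == k)) := by
  have hct : t.count c = t.length := List.count_eq_length.mpr (fun b hb => (ht b hb).symm)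
  have hcd : d.count c = 0 := List.count_eq_zero.mpr (fun hc => hd c hc rfl)
  have hcl : (c :: (t ++ d)).count c = 1 + t.length := by
    simp [List.count_cons_self, List.count_append, hct, hcd]; omega
  have hxd : ∀ x ∈ d, (c :: (t ++ d)).count x = d.count x := by
    intro x hx
    have hxc : x ≠ c := hd x hx
    have hxt : t.count x = 0 := List.count_eq_zero.mpr (fun hc => hxc ((ht x hc)))
    simp [List.count_append, hxt, Ne.symm hxc]
  simp only [List.any_cons, List.any_append]
  have htany : t.any (fun x => (c :: (t ++ d)).count x == k)
      = (!t.isEmpty && ((1 + t.length : Nat) == k)) := by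
    refine any_all_eq _ _ _ (fun x hx => ?_)
    rw [ht x hx, hcl]
  have hdany : d.any (fun x => (c :: (t ++ d)).count x == k) = d.any (fun x => d.count x == k) := by
    exact PySem.List.any_congr_mem (fun x hx => by rw [hxd x hx])
  rw [htany, hdany, hcl]
  cases hk : ((1 + t.length : Nat) == k) <;> simp

theorem runsScan_sorted : ∀ (n : Nat) (l : List Char), l.length ≤ n →
    l.Pairwise (· ≤ ·) → ∀ (t2 t3 : Bool),
    runsScan l t2 t3 = (t2 || l.any (fun c => l.count c == 2), t3 || l.any (fun c => l.count c == 3)) := by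
  intro n
  induction n with
  | zero =>
    intro l hl _ t2 t3
    have : l = [] := List.eq_nil_of_length_eq_zero (Nat.le_zero.mp hl)
    subst this
    simp [runsScan]
  | succ m ih =>
    intro l hl h t2 t3
    cases l with
    | nil => simp [runsScan]
    | cons c rest =>
      rw [runsScan]
      set t := rest.takeWhile (fun x => x == c) with htdef
      set d := rest.dropWhile (fun x => x == c) with hddef
      have hrest : t ++ d = rest := List.takeWhile_append_dropWhile
      have ht : ∀ x ∈ t, x = c := by
        intro x hx
        exact eq_of_beq (List.mem_takeWhile_imp (p := fun x => x == c) hx)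
      have hsub : d.Sublist rest := List.dropWhile_sublist _
      have hge : ∀ x ∈ rest, c ≤ x := (List.pairwise_cons.mp h).1
      have hpd : d.Pairwise (· ≤ ·) := (List.pairwise_cons.mp h).2.sublist hsub
      have hd : ∀ x ∈ d, x ≠ c := by
        cases he : d with
        | nil => simp
        | cons y d' =>
          have hy : (y == c) = false := by
            have := List.head?_dropWhile_not (fun x => x == c) rest
            rw [← hddef, he] at this; simpa using this
          have hyc : c < y := by
            have hym : y ∈ rest := hsub.subset (by simp [he])
            exact lt_of_le_of_ne (hge y hym) (fun hcy => by simp [← hcy] at hy)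
          intro x hx
          rcases List.mem_cons.mp hx with rfl | hx'
          · exact fun hc => by simp [hc] at hy
          · have : y ≤ x := ((List.pairwise_cons.mp (he ▸ hpd)).1) x hx'
            intro hc
            subst hc
            exact absurd (lt_of_lt_of_le hyc this) (lt_irrefl x)
      have hdl : d.length ≤ m := by
        have := hsub.length_le
        simp at hl; omega
      rw [ih d hdl hpd]
      have h2 := any_count_run c t d ht hd 2
      have h3 := any_count_run c t d ht hd 3
      rw [show c :: rest = c :: (t ++ d) from by rw [hrest]]
      rw [h2, h3]
      simp [Bool.or_assoc]

theorem B_eq_spec (package : String) : has_multiple_alt package = spec2_3 package.toList := by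
  unfold has_multiple_alt
  set l := package.toList with hldef
  set s := PySem.List.sorted l (fun c => c) false with hs
  have hp : s.Pairwise (· ≤ ·) := by
    have := PySem.List.sorted_pairwise l (fun c => c)
    simpa using this
  have hperm : s.Perm l := PySem.List.sorted_perm l _ false
  rw [runsScan_sorted s.length s le_rfl hp]
  have hany : ∀ k : Nat, s.any (fun c => s.count c == k) = l.any (fun c => l.count c == k) := by
    intro k
    rw [show (fun c => s.count c == k) = (fun c => l.count c == k) from
      funext fun c => by rw [hperm.count_eq]]
    exact hperm.any_eq
  unfold spec2_3
  simp [hany]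

-- ===== VERDICT (by name: the statement is the Claim_ definition above) =====
theorem has_multiple_spec : Claim_equal_has_multiple := by
  intro package _
  unfold Spec_has_multiple
  rw [A_eq_spec, B_eq_spec]
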